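-- pv_equiv track=rewrite | github.com/Panseung/python_SSAFY_SWEA-study | 210902/1493.py | new_cal
-- ===== SOURCE A (Python) =====
-- def new_cal(num):
--     pos = [1, 1]
--     cnt = 1
--     sum_pos = 2
--     while cnt < num:
--         if pos[1] == 1:
--             pos[0] = 1
--             pos[1] = sum_pos
--             sum_pos += 1
--         else:
--             pos[0] += 1
--             pos[1] -= 1
--         cnt += 1
--     return pos
-- ===== SOURCE B (Python) =====
-- def new_cal(num):
--     # jump diagonal by diagonal: diagonal k holds cells T(k-1)+1 .. T(k)
--     n = num if num > 1 else 1
--     k = 1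
--     tri = 1  # T(k) = k*(k+1)//2
--     while tri < n:
--         k += 1
--         tri += k
--     r = n - (tri - k)  # index within diagonal k
--     return [r, k - r + 1]
-- ===== Notes on version B (the rewrite author's own statement) =====
-- stated objective: faster
-- what changed: B skips whole diagonals (one loop step per diagonal, O(sqrt(num)) steps) instead of stepping cell by cell (O(num) steps), then recovers the coordinates arithmetically from the triangular number.
import Mathlib
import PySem

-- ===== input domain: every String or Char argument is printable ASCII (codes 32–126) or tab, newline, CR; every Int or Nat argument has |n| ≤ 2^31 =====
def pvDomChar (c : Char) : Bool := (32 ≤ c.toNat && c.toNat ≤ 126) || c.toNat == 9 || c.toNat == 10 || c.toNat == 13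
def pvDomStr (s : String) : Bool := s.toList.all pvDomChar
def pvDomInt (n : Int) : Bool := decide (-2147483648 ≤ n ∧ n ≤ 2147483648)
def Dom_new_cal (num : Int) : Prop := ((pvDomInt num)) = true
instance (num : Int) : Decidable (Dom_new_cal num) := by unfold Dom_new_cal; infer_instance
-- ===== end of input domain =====

-- B walks diagonal by diagonal (O(sqrt num) loop steps) instead of A's cell-by-cell walk (O(num) steps); same result.

-- ===== PORT A =====
-- A's while loop: state (pos[0], pos[1], sum_pos); runs (num-1) times (cnt goes 1..num).
def newCalLoopA : Nat → Int × Int × Int → Int × Int × Int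
  | 0, s => s
  | m + 1, (p0, p1, sp) =>
    if p1 = 1 then newCalLoopA m (1, sp, sp + 1)
    else newCalLoopA m (p0 + 1, p1 - 1, sp)

def new_cal (num : Int) : List Int :=
  let s := newCalLoopA (num - 1).toNat (1, 1, 2)
  [s.1, s.2.1]

-- ===== PORT B =====
-- B's while loop: while tri < n: k += 1; tri += k.  Terminates because tri strictly grows (needs 0 ≤ k).
def newCalLoopB (n k tri : Int) (hk : 0 ≤ k) : Int × Int :=
  if tri < n then newCalLoopB n (k + 1) (tri + (k + 1)) (by omega)
  else (k, tri)
termination_by (n - tri).toNat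
decreasing_by omega

def new_cal_alt (num : Int) : List Int :=
  let n := if num > 1 then num else 1
  let kt := newCalLoopB n 1 1 (by omega)
  let r := n - (kt.2 - kt.1)
  [r, kt.1 - r + 1]

-- ===== PRECONDITION & SPEC =====
def Spec_new_cal (num : Int) (out : List Int) : Prop := out = new_cal_alt num
instance (num : Int) (out : List Int) : Decidable (Spec_new_cal num out) := by unfold Spec_new_cal; infer_instance

-- ===== CLAIM (what is proved, stated in full; the proofs are below) =====
def Claim_equal_new_cal : Prop := ∀ (num : Int), Dom_new_cal num → Spec_new_cal num (new_cal num)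

-- ===== LEMMAS AND PROOFS =====

-- Invariant of A's loop: coordinates stay ≥ 1, p0 + p1 = sum_pos, and the cell counter
-- 2*c = (sp-2)*(sp-1) + 2*p0 advances by 2 per step.
lemma loopA_spec : ∀ (m : Nat) (p0 p1 sp : Int), 1 ≤ p0 → 1 ≤ p1 → p0 + p1 = sp →
    1 ≤ (newCalLoopA m (p0, p1, sp)).1 ∧
    1 ≤ (newCalLoopA m (p0, p1, sp)).2.1 ∧
    (newCalLoopA m (p0, p1, sp)).1 + (newCalLoopA m (p0, p1, sp)).2.1 = (newCalLoopA m (p0, p1, sp)).2.2 ∧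
    2 * (m : Int) + ((sp - 2) * (sp - 1) + 2 * p0)
      = ((newCalLoopA m (p0, p1, sp)).2.2 - 2) * ((newCalLoopA m (p0, p1, sp)).2.2 - 1)
        + 2 * (newCalLoopA m (p0, p1, sp)).1 := by
  intro m
  induction m with
  | zero => intro p0 p1 sp h0 h1 hs; simp [newCalLoopA]; omega
  | succ m ih =>
    intro p0 p1 sp h0 h1 hs
    by_cases hp : p1 = 1
    · have hrec := ih 1 sp (sp + 1) (by omega) (by omega) (by omega)
      simp only [newCalLoopA, hp] at *
      refine ⟨hrec.1, hrec.2.1, hrec.2.2.1, ?_⟩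
      have harith : 2 * ((m : Int) + 1) + ((sp - 2) * (sp - 1) + 2 * p0)
          = 2 * (m : Int) + ((sp + 1 - 2) * (sp + 1 - 1) + 2 * 1) := by
        have : p0 = sp - 1 := by omega
        subst this; ring
      push_cast
      rw [harith]; exact hrec.2.2.2
    · have hrec := ih (p0 + 1) (p1 - 1) sp (by omega) (by omega) (by omega)
      simp only [newCalLoopA, if_neg hp] at *
      refine ⟨hrec.1, hrec.2.1, hrec.2.2.1, ?_⟩
      have harith : 2 * ((m : Int) + 1) + ((sp - 2) * (sp - 1) + 2 * p0)
          = 2 * (m : Int) + ((sp - 2) * (sp - 1) + 2 * (p0 + 1)) := by ring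
      push_cast
      rw [harith]; exact hrec.2.2.2
  
-- Invariant of B's loop: starting from a triangular state with tri - k < n it returns the
-- first triangular number T(K) ≥ n (with T(K-1) < n).
lemma loopB_spec : ∀ (m : Nat) (n k tri : Int) (hk : 0 ≤ k), (n - tri).toNat ≤ m →
    1 ≤ k → 2 * tri = k * (k + 1) → tri - k < n →
    1 ≤ (newCalLoopB n k tri hk).1 ∧
    2 * (newCalLoopB n k tri hk).2 = (newCalLoopB n k tri hk).1 * ((newCalLoopB n k tri hk).1 + 1) ∧
    n ≤ (newCalLoopB n k tri hk).2 ∧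
    (newCalLoopB n k tri hk).2 - (newCalLoopB n k tri hk).1 < n := by
  intro m
  induction m with
  | zero =>
    intro n k tri hk hm h1 htri hlo
    rw [newCalLoopB]
    have : ¬ tri < n := by omega
    simp only [this, if_false]
    exact ⟨h1, htri, by omega, hlo⟩
  | succ m ih =>
    intro n k tri hk hm h1 htri hlo
    rw [newCalLoopB]
    by_cases h : tri < n
    · simp only [h, if_true]
      exact ih n (k + 1) (tri + (k + 1)) (by omega) (by omega) (by omega)
        (by nlinarith) (by omega)
    · simp only [h, if_false]
      exact ⟨h1, htri, by omega, hlo⟩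


-- ===== VERDICT (by name: the statement is the Claim_ definition above) =====
theorem new_cal_spec : Claim_equal_new_cal := by
  intro num _
  unfold Spec_new_cal new_cal new_cal_alt
  by_cases hbig : num > 1
  · simp only [hbig, if_pos]
    -- A side
    have hA := loopA_spec (num - 1).toNat 1 1 2 (by omega) (by omega) (by omega)
    set s := newCalLoopA (num - 1).toNat (1, 1, 2) with hsdef
    obtain ⟨hA0, hA1, hAs, hAc⟩ := hA
    have hcast : ((num - 1).toNat : Int) = num - 1 := by omega
    rw [hcast] at hAc
    -- B side
    have hB := loopB_spec (num - 1).toNat num 1 1 (by omega) (by omega) (by omega) (by omega) (by omega)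
    set kt := newCalLoopB num 1 1 (by omega) with hktdef
    obtain ⟨hK1, hKT, hKn, hKlo⟩ := hB
    -- uniqueness of the diagonal: kt.1 = s.2.2 - 1
    have hkeq : kt.1 = s.2.2 - 1 := by
      have hA2 : 2 * num = (s.2.2 - 2) * (s.2.2 - 1) + 2 * s.1 := by omega
      have hup : 2 * num ≤ (s.2.2 - 1) * s.2.2 := by nlinarith
      have hlo' : (s.2.2 - 2) * (s.2.2 - 1) < 2 * num := by nlinarith
      have hBup : 2 * num ≤ kt.1 * (kt.1 + 1) := by nlinarith
      have hBlo : kt.1 * (kt.1 - 1) < 2 * num := by nlinarith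
      by_contra hne
      rcases lt_or_gt_of_ne hne with hlt | hgt
      · have : kt.1 * (kt.1 + 1) ≤ (s.2.2 - 2) * (s.2.2 - 1) := by nlinarith
        omega
      · have : (s.2.2 - 1) * s.2.2 ≤ kt.1 * (kt.1 - 1) := by nlinarith
        omega
    -- hence the in-diagonal index agrees
    have hreq : num - (kt.2 - kt.1) = s.1 := by
      have hA2 : 2 * num = (s.2.2 - 2) * (s.2.2 - 1) + 2 * s.1 := by omega
      have : 2 * (kt.2 - kt.1) = kt.1 * (kt.1 - 1) := by linear_combination hKT
      rw [hkeq] at this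
      have : 2 * (kt.2 - kt.1) = (s.2.2 - 2) * (s.2.2 - 1) := by nlinarith
      omega
    simp only [List.cons.injEq, and_true]
    constructor
    · omega
    · omega
  · -- num ≤ 1: A's loop runs 0 times, B clamps n to 1 and its loop stops immediately.
    have h0 : (num - 1).toNat = 0 := by omega
    simp only [hbig, if_false, h0]
    rw [newCalLoopB]
    norm_num [newCalLoopA]
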